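-- pv_equiv track=rewrite | github.com/AkhilTrc/semantic-selection-agent | trial_V4.py | per_item_empowerment
-- ===== SOURCE A (Python) =====
-- from typing import Callable, Dict, Iterable, List, Optional, Sequence, Set, Tuple, Any
-- from collections import deque
--
-- Pair = Tuple[str, str]
--
-- def _canon_pair(a: str, b: str, ordered: bool=False) -> Pair:
--     a, b = a.strip(), b.strip()
--     return (a, b) if ordered else tuple(sorted((a, b)))
--
-- def pair_empowerment(pair: Pair, inventory_set: Set[str], rules_lookup: Dict[Pair, List[str]], depth: int=2) -> int:
--     if pair not in rules_lookup: return 0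
--     start_new = [x for x in rules_lookup[pair] if x not in inventory_set]
--     if depth <= 1: return len(start_new)
--     seen = set(inventory_set) | set(start_new)
--     frontier = deque(start_new)
--     for _ in range(depth-1):
--         nxt = []
--         while frontier:
--             x = frontier.popleft()
--             for (a,b), outs in rules_lookup.items():
--                 if x in (a,b):
--                     for r in outs:
--                         if r not in seen:
--                             seen.add(r); nxt.append(r)
--         if not nxt: break
--         frontier = deque(nxt)
--     return max(0, len(seen) - len(inventory_set))
--
-- def per_item_empowerment(inventory: Sequence[str], tried_combos: Set[Pair], rules_lookup: Dict[Pair, List[str]], depth: int=2) -> List[Tuple[str,int]]: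
--     inv_set = set(inventory)
--     best = {x:0 for x in inventory}
--     for a in inventory:
--         for b in inventory:
--             if a >= b: continue
--             p = _canon_pair(a,b)
--             if p in tried_combos: continue
--             s = pair_empowerment(p, inv_set, rules_lookup, depth=depth)
--             if s > best[a]: best[a] = s
--             if s > best[b]: best[b] = s
--     return sorted(best.items(), key=lambda t: t[1], reverse=True)
-- ===== SOURCE B (Python) =====
-- def per_item_empowerment(inventory, tried_combos, rules_lookup, depth=2):
--     inv_set = set(inventory)
--     adj = {}
--     for (a, b), outs in rules_lookup.items():
--         adj.setdefault(a, []).extend(outs)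
--         if b != a:
--             adj.setdefault(b, []).extend(outs)
--     stripped = {x: x.strip() for x in inventory}
--     def score(p):
--         outs = rules_lookup.get(p)
--         if outs is None:
--             return 0
--         start_new = [x for x in outs if x not in inv_set]
--         if depth <= 1:
--             return len(start_new)
--         new_set = set(start_new)
--         frontier = start_new
--         rounds = depth - 1
--         while rounds > 0 and frontier:
--             rounds -= 1
--             nxt = []
--             for x in frontier:
--                 for r in adj.get(x, []):
--                     if r not in inv_set and r not in new_set:
--                         new_set.add(r)
--                         nxt.append(r)
--             frontier = nxt
--         return len(new_set)
--     best = {x: 0 for x in inventory}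
--     for a in inventory:
--         sa = stripped[a]
--         for b in inventory:
--             if a < b:
--                 sb = stripped[b]
--                 p = (sa, sb) if sa <= sb else (sb, sa)
--                 if p not in tried_combos:
--                     s = score(p)
--                     if s > best[a]:
--                         best[a] = s
--                     if s > best[b]:
--                         best[b] = s
--     return sorted(best.items(), key=lambda t: t[1], reverse=True)
-- ===== Notes on version B (the rewrite author's own statement) =====
-- stated objective: faster
-- what changed: B precomputes an element->rule-outputs adjacency index and a strip cache once, so the BFS expands each frontier node by a dict lookup instead of rescanning every rule and the pair loop reuses precomputed stripped strings; intended as faster (a timing run measured ~1.5-1.6x at the largest sizes, borderline).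
import Mathlib
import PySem

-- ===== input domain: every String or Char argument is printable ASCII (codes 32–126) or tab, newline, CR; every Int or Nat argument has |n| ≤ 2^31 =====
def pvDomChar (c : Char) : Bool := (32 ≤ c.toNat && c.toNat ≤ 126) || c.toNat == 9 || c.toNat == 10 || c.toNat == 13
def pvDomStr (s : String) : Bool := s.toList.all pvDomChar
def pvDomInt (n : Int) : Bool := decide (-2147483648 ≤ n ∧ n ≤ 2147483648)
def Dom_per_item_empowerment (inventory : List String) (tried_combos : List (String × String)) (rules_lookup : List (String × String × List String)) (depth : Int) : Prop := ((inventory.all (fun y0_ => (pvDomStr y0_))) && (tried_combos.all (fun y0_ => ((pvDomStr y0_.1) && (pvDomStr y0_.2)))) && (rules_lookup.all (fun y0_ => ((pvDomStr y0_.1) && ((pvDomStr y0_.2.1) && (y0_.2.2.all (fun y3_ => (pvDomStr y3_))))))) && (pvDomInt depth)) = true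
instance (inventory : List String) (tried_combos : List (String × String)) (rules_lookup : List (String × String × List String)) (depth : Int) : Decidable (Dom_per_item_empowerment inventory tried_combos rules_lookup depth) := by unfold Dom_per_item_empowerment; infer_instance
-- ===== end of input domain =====

-- B replaces A's per-frontier-node scan over ALL rules by an element→outputs adjacency index
-- built once, caches stripped strings, and counts newly discovered elements directly; intended
-- as faster (timing run measured ~1.5-1.6x on its largest inputs); same return value everywhere.

-- shared tiny helpers (identical code in both Python sources):
-- _canon_pair / _canon: strip both, then tuple(sorted((a, b))) on two elements
def pvCanonPair (a b : String) : String × String :=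
  let a' := PySem.Str.strip a
  let b' := PySem.Str.strip b
  if a' ≤ b' then (a', b') else (b', a')

-- dict lookup on the rules dict (unique keys; first match), used by 'pair in rules_lookup' /
-- 'rules_lookup[pair]' in A and 'rules_lookup.get(p)' in B
def pvRulesGet? (rl : List (String × String × List String)) (p : String × String) : Option (List String) :=
  match rl with
  | [] => none
  | (a, b, outs) :: t => if a = p.1 ∧ b = p.2 then some outs else pvRulesGet? t p

-- ===== PORT A =====
-- 'if r not in seen: seen.add(r); nxt.append(r)'
def pvStepA (st : PySem.Set String × List String) (r : String) : PySem.Set String × List String :=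
  if PySem.Set.contains st.1 r then st else (PySem.Set.add st.1 r, st.2 ++ [r])

-- one 'while frontier:' pass: for each x, scan rules_lookup.items() for 'x in (a, b)'
def pvRoundA (rl : List (String × String × List String)) (frontier : List String)
    (seen : PySem.Set String) : PySem.Set String × List String :=
  frontier.foldl
    (fun st x => rl.foldl
      (fun st e => if x = e.1 ∨ x = e.2.1 then e.2.2.foldl pvStepA st else st) st)
    (seen, [])

-- 'for _ in range(depth-1): … if not nxt: break'
def pvLoopA (rl : List (String × String × List String)) :
    Nat → PySem.Set String → List String → PySem.Set String
  | 0, seen, _ => seen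
  | n + 1, seen, frontier =>
    let st := pvRoundA rl frontier seen
    if st.2.isEmpty then st.1 else pvLoopA rl n st.1 st.2

-- pair_empowerment(pair, inventory_set, rules_lookup, depth)
def pvPairEmp (pair : String × String) (invSet : PySem.Set String)
    (rl : List (String × String × List String)) (depth : Int) : Int :=
  match pvRulesGet? rl pair with
  | none => 0
  | some outs =>
    let startNew := outs.filter (fun x => !(PySem.Set.contains invSet x))
    if depth ≤ 1 then (startNew.length : Int)
    else
      let seen := PySem.Set.union invSet startNew
      let seen := pvLoopA rl (depth - 1).toNat seen startNew
      max 0 ((PySem.Set.len seen : Int) - (PySem.Set.len invSet : Int))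

def per_item_empowerment (inventory : List String) (tried_combos : List (String × String)) (rules_lookup : List (String × String × List String)) (depth : Int) : List (String × Int) :=
  let invSet := PySem.Set.ofList inventory
  let best0 : PySem.Dict String Int :=
    inventory.foldl (fun d x => d.insert x 0) PySem.Dict.empty   -- {x: 0 for x in inventory}
  let best := inventory.foldl (fun best a =>
    inventory.foldl (fun best b =>
      if b ≤ a then best            -- 'if a >= b: continue'
      else
        let p := pvCanonPair a b
        if tried_combos.contains p then best
        else
          let s := pvPairEmp p invSet rules_lookup depth
          let best := if s > best.getD a 0 then best.insert a s else best  -- best[a]: key present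
          if s > best.getD b 0 then best.insert b s else best)
      best) best0
  PySem.List.sorted best.items (fun t => t.2) true

-- ===== PORT B =====
-- adj = {}; for (a,b), outs: adj.setdefault(a,[]).extend(outs); if b != a: same for b
def pvAdjB (rl : List (String × String × List String)) : PySem.Dict String (List String) :=
  rl.foldl (fun d e =>
    let d := d.modify e.1 [] (fun l => l ++ e.2.2)
    if e.2.1 ≠ e.1 then d.modify e.2.1 [] (fun l => l ++ e.2.2) else d)
    PySem.Dict.empty

-- 'if r not in inv_set and r not in new_set: new_set.add(r); nxt.append(r)'
def pvStepB (invSet : PySem.Set String) (st : PySem.Set String × List String) (r : String) :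
    PySem.Set String × List String :=
  if !(PySem.Set.contains invSet r) && !(PySem.Set.contains st.1 r)
  then (PySem.Set.add st.1 r, st.2 ++ [r]) else st

-- one round: for each frontier x, walk adj.get(x, [])
def pvRoundB (adj : PySem.Dict String (List String)) (invSet : PySem.Set String)
    (frontier : List String) (newSet : PySem.Set String) : PySem.Set String × List String :=
  frontier.foldl (fun st x => (adj.getD x []).foldl (pvStepB invSet) st) (newSet, [])

-- 'while rounds > 0 and frontier:'
def pvLoopB (adj : PySem.Dict String (List String)) (invSet : PySem.Set String) :
    Nat → PySem.Set String → List String → PySem.Set String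
  | 0, s, _ => s
  | _ + 1, s, [] => s
  | n + 1, s, x :: f =>
    let st := pvRoundB adj invSet (x :: f) s
    pvLoopB adj invSet n st.1 st.2

-- score(p)
def pvScoreB (adj : PySem.Dict String (List String)) (invSet : PySem.Set String)
    (rl : List (String × String × List String)) (depth : Int) (p : String × String) : Int :=
  match pvRulesGet? rl p with
  | none => 0
  | some outs =>
    let startNew := outs.filter (fun x => !(PySem.Set.contains invSet x))
    if depth ≤ 1 then (startNew.length : Int)
    else
      let newSet := PySem.Set.ofList startNew
      (PySem.Set.len (pvLoopB adj invSet (depth - 1).toNat newSet startNew) : Int)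

def per_item_empowerment_alt (inventory : List String) (tried_combos : List (String × String)) (rules_lookup : List (String × String × List String)) (depth : Int) : List (String × Int) :=
  let invSet := PySem.Set.ofList inventory
  let adj := pvAdjB rules_lookup
  -- stripped = {x: x.strip() for x in inventory}
  let stripped : PySem.Dict String String :=
    inventory.foldl (fun d x => d.insert x (PySem.Str.strip x)) PySem.Dict.empty
  let best0 : PySem.Dict String Int :=
    inventory.foldl (fun d x => d.insert x 0) PySem.Dict.empty
  let best := inventory.foldl (fun best a =>
    let sa := stripped.getD a ""          -- stripped[a]: key present (a in inventory)
    inventory.foldl (fun best b =>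
      if a < b then
        let sb := stripped.getD b ""
        let p := if sa ≤ sb then (sa, sb) else (sb, sa)
        if tried_combos.contains p then best
        else
          let s := pvScoreB adj invSet rules_lookup depth p
          let best := if s > best.getD a 0 then best.insert a s else best
          if s > best.getD b 0 then best.insert b s else best
      else best)
      best) best0
  PySem.List.sorted best.items (fun t => t.2) true

-- ===== PRECONDITION & SPEC =====
def Spec_per_item_empowerment (inventory : List String) (tried_combos : List (String × String)) (rules_lookup : List (String × String × List String)) (depth : Int) (out : List (String × Int)) : Prop := out = per_item_empowerment_alt inventory tried_combos rules_lookup depth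
instance (inventory : List String) (tried_combos : List (String × String)) (rules_lookup : List (String × String × List String)) (depth : Int) (out : List (String × Int)) : Decidable (Spec_per_item_empowerment inventory tried_combos rules_lookup depth out) := by unfold Spec_per_item_empowerment; infer_instance

-- ===== CLAIM (what is proved, stated in full; the proofs are below) =====
def Claim_equal_per_item_empowerment : Prop := ∀ (inventory : List String) (tried_combos : List (String × String)) (rules_lookup : List (String × String × List String)) (depth : Int), Dom_per_item_empowerment inventory tried_combos rules_lookup depth → Spec_per_item_empowerment inventory tried_combos rules_lookup depth (per_item_empowerment inventory tried_combos rules_lookup depth)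

-- ===== LEMMAS AND PROOFS =====

-- outputs of all rules mentioning x, concatenated in rule order
def pvMatchOuts (rl : List (String × String × List String)) (x : String) : List String :=
  rl.flatMap (fun e => if x = e.1 ∨ x = e.2.1 then e.2.2 else [])

theorem pvAdj_getD_aux (x : String) (rl : List (String × String × List String))
    (d : PySem.Dict String (List String)) :
    (rl.foldl (fun d e =>
      let d := d.modify e.1 [] (fun l => l ++ e.2.2)
      if e.2.1 ≠ e.1 then d.modify e.2.1 [] (fun l => l ++ e.2.2) else d) d).getD x []
      = d.getD x [] ++ pvMatchOuts rl x := by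
  induction rl generalizing d with
  | nil => simp [pvMatchOuts]
  | cons e t ih =>
    obtain ⟨a, b, outs⟩ := e
    simp only [List.foldl_cons, pvMatchOuts, List.flatMap_cons]
    rw [ih]
    have hstep : ((if b ≠ a then (d.modify a [] (fun l => l ++ outs)).modify b [] (fun l => l ++ outs)
        else d.modify a [] (fun l => l ++ outs)).getD x [])
        = d.getD x [] ++ (if x = a ∨ x = b then outs else []) := by
      have hmod : ∀ (d : PySem.Dict String (List String)) (k : String) (os : List String),
          (d.modify k [] (fun l => l ++ os)).getD x []
            = if x = k then d.getD k [] ++ os else d.getD x [] := by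
        intro d k os
        by_cases hk : x = k
        · subst hk; rw [PySem.Dict.getD_modify_self, if_pos rfl]
        · rw [if_neg hk, PySem.Dict.modify, PySem.Dict.getD,
              PySem.Dict.get?_insert_of_ne _ _ hk, PySem.Dict.getD]
      by_cases hba : b = a
      · subst hba
        simp only [ne_eq, not_true_eq_false, ite_false, hmod]
        by_cases hx : x = b <;> simp [hx]
      · rw [if_pos hba, hmod, hmod]
        by_cases hxb : x = b
        · subst hxb; simp [hmod, hba]
        · have hab : a ≠ b := fun h => hba h.symm
          by_cases hxa : x = a <;> simp [hxa, hxb, hab]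
    rw [hstep, pvMatchOuts, List.append_assoc]

theorem pvAdj_getD (rl : List (String × String × List String)) (x : String) :
    (pvAdjB rl).getD x [] = pvMatchOuts rl x := by
  rw [pvAdjB, pvAdj_getD_aux, PySem.Dict.getD_empty, List.nil_append]

theorem pvScan_eq (rl : List (String × String × List String)) (x : String)
    (st : PySem.Set String × List String) :
    rl.foldl (fun st e => if x = e.1 ∨ x = e.2.1 then e.2.2.foldl pvStepA st else st) st
      = (pvMatchOuts rl x).foldl pvStepA st := by
  induction rl generalizing st with
  | nil => simp [pvMatchOuts]
  | cons e t ih =>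
    simp only [List.foldl_cons, pvMatchOuts, List.flatMap_cons, List.foldl_append]
    rw [ih]
    by_cases h : x = e.1 ∨ x = e.2.1 <;> simp [h, pvMatchOuts]

theorem pvStep_corr (invSet : PySem.Set String) (st : PySem.Set String × List String)
    (r : String) :
    pvStepA (invSet ++ st.1, st.2) r
      = (invSet ++ (pvStepB invSet st r).1, (pvStepB invSet st r).2) := by
  simp only [pvStepA, pvStepB, PySem.Set.contains, List.contains_append, PySem.Set.add]
  by_cases hi : r ∈ invSet <;> by_cases hn : r ∈ st.1 <;> simp [hi, hn]

theorem pvFoldStep_corr (invSet : PySem.Set String) (l : List String)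
    (st : PySem.Set String × List String) :
    l.foldl pvStepA (invSet ++ st.1, st.2)
      = (invSet ++ (l.foldl (pvStepB invSet) st).1, (l.foldl (pvStepB invSet) st).2) := by
  induction l generalizing st with
  | nil => rfl
  | cons r t ih =>
    simp only [List.foldl_cons]
    rw [pvStep_corr, ih]

theorem pvRound_corr_aux (rl : List (String × String × List String)) (invSet : PySem.Set String)
    (frontier : List String) (st : PySem.Set String × List String) :
    frontier.foldl
      (fun st x => rl.foldl
        (fun st e => if x = e.1 ∨ x = e.2.1 then e.2.2.foldl pvStepA st else st) st)
      (invSet ++ st.1, st.2)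
      = (invSet ++ (frontier.foldl (fun st x => ((pvAdjB rl).getD x []).foldl (pvStepB invSet) st) st).1,
         (frontier.foldl (fun st x => ((pvAdjB rl).getD x []).foldl (pvStepB invSet) st) st).2) := by
  induction frontier generalizing st with
  | nil => rfl
  | cons x f ih =>
    simp only [List.foldl_cons]
    rw [pvScan_eq, pvAdj_getD, pvFoldStep_corr, ih]

theorem pvRound_corr (rl : List (String × String × List String)) (invSet : PySem.Set String)
    (frontier : List String) (ns : PySem.Set String) :
    pvRoundA rl frontier (invSet ++ ns)
      = (invSet ++ (pvRoundB (pvAdjB rl) invSet frontier ns).1,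
         (pvRoundB (pvAdjB rl) invSet frontier ns).2) := by
  exact pvRound_corr_aux rl invSet frontier (ns, [])

theorem pvLoop_corr (rl : List (String × String × List String)) (invSet : PySem.Set String)
    (n : Nat) (ns : PySem.Set String) (frontier : List String) :
    pvLoopA rl n (invSet ++ ns) frontier
      = invSet ++ pvLoopB (pvAdjB rl) invSet n ns frontier := by
  induction n generalizing ns frontier with
  | zero => rfl
  | succ n ih =>
    match frontier with
    | [] => simp [pvLoopA, pvLoopB, pvRoundA]
    | x :: f =>
      simp only [pvLoopA, pvLoopB, pvRound_corr]
      rcases hnxt : (pvRoundB (pvAdjB rl) invSet (x :: f) ns).2 with _ | ⟨y, t⟩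
      · simp only [List.isEmpty_nil, if_true]
        rw [show pvLoopB (pvAdjB rl) invSet n (pvRoundB (pvAdjB rl) invSet (x :: f) ns).1 [] =
              (pvRoundB (pvAdjB rl) invSet (x :: f) ns).1 from by cases n <;> rfl]
      · simp only [List.isEmpty_cons, if_false, Bool.false_eq_true]
        rw [← hnxt, ih]

theorem pvUpdate_split (invSet : PySem.Set String) (t : List String)
    (h : ∀ x ∈ t, PySem.Set.contains invSet x = false) (s : PySem.Set String) :
    t.foldl PySem.Set.add (invSet ++ s) = invSet ++ t.foldl PySem.Set.add s := by
  induction t generalizing s with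
  | nil => rfl
  | cons x ts ih =>
    have hx : PySem.Set.contains invSet x = false := h x (List.mem_cons_self)
    have hx' : x ∉ invSet := by
      simpa [PySem.Set.contains] using hx
    simp only [List.foldl_cons]
    have : PySem.Set.add (invSet ++ s) x = invSet ++ PySem.Set.add s x := by
      simp only [PySem.Set.add, PySem.Set.contains, List.contains_append]
      by_cases hs : x ∈ s <;> simp [hs, hx']
    rw [this, ih (fun y hy => h y (List.mem_cons_of_mem _ hy))]

theorem pvUnion_split (invSet : PySem.Set String) (t : List String)
    (h : ∀ x ∈ t, PySem.Set.contains invSet x = false) :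
    PySem.Set.union invSet t = invSet ++ PySem.Set.ofList t := by
  have := pvUpdate_split invSet t h []
  simpa [PySem.Set.union, PySem.Set.update, PySem.Set.ofList, PySem.Set.empty] using this

theorem pvStripCache_getD (l : List String) (d : PySem.Dict String String) (a : String)
    (dflt : String) :
    (l.foldl (fun d x => d.insert x (PySem.Str.strip x)) d).getD a dflt
      = if a ∈ l then PySem.Str.strip a else d.getD a dflt := by
  induction l generalizing d with
  | nil => simp
  | cons x t ih =>
    simp only [List.foldl_cons, ih, List.mem_cons]
    by_cases hat : a ∈ t
    · simp [hat]
    · simp only [hat, if_false, or_false, PySem.Dict.getD_insert]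
      by_cases hax : a = x
      · subst hax; simp
      · simp [hax]

theorem pvPairEmp_eq (p : String × String) (invSet : PySem.Set String)
    (rl : List (String × String × List String)) (depth : Int) :
    pvPairEmp p invSet rl depth = pvScoreB (pvAdjB rl) invSet rl depth p := by
  unfold pvPairEmp pvScoreB
  cases hg : pvRulesGet? rl p with
  | none => rfl
  | some outs =>
    simp only
    by_cases hd : depth ≤ 1
    · simp [hd]
    · simp only [hd, if_false]
      have hfil : ∀ x ∈ outs.filter (fun x => !(PySem.Set.contains invSet x)),
          PySem.Set.contains invSet x = false := by
        intro x hx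
        simpa using (List.of_mem_filter hx)
      rw [pvUnion_split invSet _ hfil, pvLoop_corr]
      simp only [PySem.Set.len, List.length_append]
      push_cast
      omega

-- ===== VERDICT (by name: the statement is the Claim_ definition above) =====
theorem per_item_empowerment_spec : Claim_equal_per_item_empowerment := by
  intro inventory tried_combos rules_lookup depth _
  unfold Spec_per_item_empowerment
  simp only [per_item_empowerment, per_item_empowerment_alt]
  congr 2
  apply PySem.List.foldl_congr_mem
  intro best a ha
  apply PySem.List.foldl_congr_mem
  intro best b hb
  by_cases hab : b ≤ a
  · simp [hab, not_lt.mpr hab]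
  · rw [if_neg hab, if_pos (lt_of_not_ge hab)]
    simp only [pvStripCache_getD, ha, hb, if_pos, pvCanonPair, pvPairEmp_eq]
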